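-- pv_equiv track=rewrite | github.com/coallaoh/UT-TML | utils/datasets.py | _get_values2labels
-- ===== SOURCE A (Python) =====
-- def _get_values2labels(num_classes, latent_size):
--     if num_classes > latent_size:
--         raise ValueError("Number of classes cannot exceed latent size")
--     values_per_class, extra_values = divmod(latent_size, num_classes)
--     class_boundaries = [
--         (class_idx + 1) * values_per_class + min(class_idx + 1, extra_values)
--         for class_idx in range(num_classes)
--     ]
--     value_to_class_mapping = {}
--     for latent_value in range(latent_size):
--         current_class = next(i for i, boundary in enumerate(class_boundaries) if latent_value < boundary)
--         value_to_class_mapping[latent_value] = current_class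
--     return value_to_class_mapping
-- ===== SOURCE B (Python) =====
-- def _get_values2labels(num_classes, latent_size):
--     if num_classes > latent_size:
--         raise ValueError("Number of classes cannot exceed latent size")
--     q, r = divmod(latent_size, num_classes)
--     big = r * (q + 1)  # first r classes hold q+1 values, the rest hold q
--     return {v: (v // (q + 1) if v < big else r + (v - big) // q)
--             for v in range(latent_size)}
-- ===== Notes on version B (the rewrite author's own statement) =====
-- stated objective: faster
-- what changed: Replaces the per-value linear scan of the boundary list with a closed-form O(1) classification (first r classes have size q+1, the rest size q), so the whole mapping is one dict comprehension.
import Mathlib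
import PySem

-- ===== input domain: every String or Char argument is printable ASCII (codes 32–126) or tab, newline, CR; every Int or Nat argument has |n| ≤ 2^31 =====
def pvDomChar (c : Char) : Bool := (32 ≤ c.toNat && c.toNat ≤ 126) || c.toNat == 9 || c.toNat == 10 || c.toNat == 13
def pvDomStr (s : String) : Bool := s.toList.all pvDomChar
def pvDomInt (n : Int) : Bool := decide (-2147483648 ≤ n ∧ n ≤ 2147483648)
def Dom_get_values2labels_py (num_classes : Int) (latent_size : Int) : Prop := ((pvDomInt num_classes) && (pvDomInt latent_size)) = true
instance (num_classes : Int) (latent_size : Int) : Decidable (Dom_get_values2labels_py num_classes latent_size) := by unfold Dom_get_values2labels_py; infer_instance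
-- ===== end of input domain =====

-- B replaces A's per-value linear scan of the boundary list with a closed-form O(1)
-- classification per value (first r classes hold q+1 values, the rest hold q).

-- ===== PORT A =====
def get_values2labels_py (num_classes : Int) (latent_size : Int) : List (Int × Int) :=
  if num_classes > latent_size then []  -- raise ValueError (excluded by Pre_)
  else
    match PySem.Int.divmod? latent_size num_classes with
    | none => []  -- ZeroDivisionError (excluded by Pre_)
    | some (values_per_class, extra_values) =>
      let class_boundaries : List Int :=
        (PySem.List.pyRange 0 num_classes 1).map
          (fun class_idx => (class_idx + 1) * values_per_class + min (class_idx + 1) extra_values)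
      ((PySem.List.pyRange 0 latent_size 1).foldl
        (fun (d : PySem.Dict Int Int) latent_value =>
          match (PySem.List.enumerate class_boundaries 0).find? (fun p => latent_value < p.2) with
          | some (i, _) => d.insert latent_value i
          | none => d)  -- StopIteration (excluded by Pre_)
        PySem.Dict.empty).items

-- ===== PORT B =====
def get_values2labels_py_alt (num_classes : Int) (latent_size : Int) : List (Int × Int) :=
  if num_classes > latent_size then []  -- raise ValueError (excluded by Pre_)
  else
    match PySem.Int.divmod? latent_size num_classes with
    | none => []  -- ZeroDivisionError (excluded by Pre_)
    | some (q, r) =>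
      let big := r * (q + 1)
      (PySem.List.pyRange 0 latent_size 1).map
        (fun v => (v, if v < big then PySem.Int.floordiv v (q + 1)
                      else r + PySem.Int.floordiv (v - big) q))

-- ===== PRECONDITION & SPEC =====
-- Pre_ excludes exactly the inputs on which A raises: ValueError when num_classes > latent_size,
-- ZeroDivisionError when num_classes = 0, and StopIteration when num_classes < 0 < latent_size.
def Pre_get_values2labels_py (num_classes : Int) (latent_size : Int) : Prop :=
  num_classes ≤ latent_size ∧ num_classes ≠ 0 ∧ (0 < num_classes ∨ latent_size ≤ 0)
instance (num_classes : Int) (latent_size : Int) : Decidable (Pre_get_values2labels_py num_classes latent_size) := by unfold Pre_get_values2labels_py; infer_instance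

def pvWitness_get_values2labels_py : Int × Int := (2, 5)

def Spec_get_values2labels_py (num_classes : Int) (latent_size : Int) (out : List (Int × Int)) : Prop := out = get_values2labels_py_alt num_classes latent_size
instance (num_classes : Int) (latent_size : Int) (out : List (Int × Int)) : Decidable (Spec_get_values2labels_py num_classes latent_size out) := by unfold Spec_get_values2labels_py; infer_instance

-- ===== CLAIM (what is proved, stated in full; the proofs are below) =====
def Claim_equal_get_values2labels_py : Prop := ∀ (num_classes : Int) (latent_size : Int), Dom_get_values2labels_py num_classes latent_size → Pre_get_values2labels_py num_classes latent_size → Spec_get_values2labels_py num_classes latent_size (get_values2labels_py num_classes latent_size)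

-- ===== LEMMAS AND PROOFS =====

-- find? over an enumerated list returns the first index (plus start) satisfying the predicate
theorem pv_find_enumerate {α : Type} (bs : List α) (p : α → Bool) (s : Int) (k : Nat)
    (hk : k < bs.length) (hp : p bs[k] = true)
    (hprev : ∀ j (hj : j < k), p (bs[j]'(Nat.lt_trans hj hk)) = false) :
    (PySem.List.enumerate bs s).find? (fun q => p q.2) = some (s + k, bs[k]) := by
  induction bs generalizing s k with
  | nil => simp at hk
  | cons x xs ih =>
    rw [PySem.List.enumerate_cons, List.find?_cons]
    cases k with
    | zero =>
      simp only [List.getElem_cons_zero] at hp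
      simp [hp]
    | succ k =>
      have h0 : p x = false := hprev 0 (Nat.succ_pos k)
      simp only [h0]
      have := ih (s + 1) k (by simpa using Nat.lt_of_succ_lt_succ hk)
        (by simpa using hp)
        (fun j hj => by simpa using hprev (j + 1) (Nat.succ_lt_succ hj))
      rw [this]
      congr 2
      push_cast
      ring

-- the class assigned by B's closed form is the first index whose boundary exceeds v
theorem pv_class_props (nc ls v : Int) (hnc : 0 < nc) (hle : nc ≤ ls)
    (hv0 : 0 ≤ v) (hvl : v < ls) :
    let q := PySem.Int.floordiv ls nc
    let r := PySem.Int.mod ls nc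
    let c := if v < r * (q + 1) then PySem.Int.floordiv v (q + 1)
             else r + PySem.Int.floordiv (v - r * (q + 1)) q
    0 ≤ c ∧ c < nc ∧ v < (c + 1) * q + min (c + 1) r ∧
      ∀ j : Int, 0 ≤ j → j < c → (j + 1) * q + min (j + 1) r ≤ v := by
  intro q r c
  have hid : q * nc + r = ls := PySem.Int.floordiv_mul_add_mod ls nc
  have hr0 : 0 ≤ r := PySem.Int.mod_nonneg ls hnc
  have hrn : r < nc := PySem.Int.mod_lt ls hnc
  have hq1 : 1 ≤ q := by
    rw [show q = PySem.Int.floordiv ls nc from rfl,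
      PySem.Int.le_floordiv_iff_mul_le hnc]; linarith
  have hq0 : 0 < q := by linarith
  have hq10 : 0 < q + 1 := by linarith
  -- the common "start of class c ≤ v" fact, from which hprev follows by monotonicity
  have key : 0 ≤ c ∧ c < nc ∧ v < (c + 1) * q + min (c + 1) r ∧ c * q + min c r ≤ v := by
    by_cases hbig : v < r * (q + 1)
    · -- v in one of the first r classes (size q+1)
      have hc : c = PySem.Int.floordiv v (q + 1) := by simp [c, hbig]
      have hc0 : 0 ≤ c := by
        rw [hc, PySem.Int.le_floordiv_iff_mul_le hq10]; linarith
      have hcr : c < r := by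
        rw [hc, PySem.Int.floordiv_lt_iff_lt_mul hq10]; linarith
      have hup : v < (c + 1) * (q + 1) := by
        have : PySem.Int.floordiv v (q + 1) < c + 1 := by rw [hc]; linarith
        rwa [PySem.Int.floordiv_lt_iff_lt_mul hq10] at this
      have hlo : c * (q + 1) ≤ v := by
        have : c ≤ PySem.Int.floordiv v (q + 1) := by rw [hc]
        rwa [PySem.Int.le_floordiv_iff_mul_le hq10] at this
      refine ⟨hc0, by linarith, ?_, ?_⟩
      · have hmin : min (c + 1) r = c + 1 := min_eq_left (by linarith)
        rw [hmin]; nlinarith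
      · have hmin : min c r = c := min_eq_left (by linarith)
        rw [hmin]; nlinarith
    · -- v in one of the remaining classes (size q)
      set t := PySem.Int.floordiv (v - r * (q + 1)) q with ht
      have hc : c = r + t := by
        simp only [c]; rw [if_neg hbig, ht]
      rw [not_lt] at hbig
      have ht0 : 0 ≤ t := by
        rw [ht, PySem.Int.le_floordiv_iff_mul_le hq0]; linarith
      have hcn : c < nc := by
        have : t < nc - r := by
          rw [ht, PySem.Int.floordiv_lt_iff_lt_mul hq0]; nlinarith
        omega
      have hup : v - r * (q + 1) < (t + 1) * q := by
        have : PySem.Int.floordiv (v - r * (q + 1)) q < t + 1 := by rw [← ht]; linarith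
        rwa [PySem.Int.floordiv_lt_iff_lt_mul hq0] at this
      have hlo : t * q ≤ v - r * (q + 1) := by
        have : t ≤ PySem.Int.floordiv (v - r * (q + 1)) q := le_of_eq ht
        rwa [PySem.Int.le_floordiv_iff_mul_le hq0] at this
      refine ⟨by omega, hcn, ?_, ?_⟩
      · have hmin : min (c + 1) r = r := min_eq_right (by omega)
        rw [hmin, hc]; nlinarith
      · have hmin : min c r = r := min_eq_right (by omega)
        rw [hmin, hc]; nlinarith
  obtain ⟨hc0, hcn, hup, hstart⟩ := key
  refine ⟨hc0, hcn, hup, fun j hj0 hjc => ?_⟩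
  -- boundary monotonicity: bd j ≤ start of class c ≤ v
  have h1 : (j + 1) * q ≤ c * q := by
    have : j + 1 ≤ c := by omega
    exact mul_le_mul_of_nonneg_right this (by linarith)
  have h2 : min (j + 1) r ≤ min c r := by omega
  linarith

-- one step of A's loop, for an in-range value, is a fresh insert of B's class
theorem pv_step_eq (nc ls : Int) (hnc : 0 < nc) (hle : nc ≤ ls)
    (v : Int) (hv0 : 0 ≤ v) (hvl : v < ls) (d : PySem.Dict Int Int) :
    (match (PySem.List.enumerate
        ((PySem.List.pyRange 0 nc 1).map
          (fun ci => (ci + 1) * PySem.Int.floordiv ls nc + min (ci + 1) (PySem.Int.mod ls nc))) 0).find?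
        (fun p => v < p.2) with
     | some (i, _) => d.insert v i
     | none => d) =
    d.insert v (if v < PySem.Int.mod ls nc * (PySem.Int.floordiv ls nc + 1)
                then PySem.Int.floordiv v (PySem.Int.floordiv ls nc + 1)
                else PySem.Int.mod ls nc +
                  PySem.Int.floordiv (v - PySem.Int.mod ls nc * (PySem.Int.floordiv ls nc + 1))
                    (PySem.Int.floordiv ls nc)) := by
  obtain ⟨hc0, hcn, hup, hprev⟩ := pv_class_props nc ls v hnc hle hv0 hvl
  set q := PySem.Int.floordiv ls nc with hq
  set r := PySem.Int.mod ls nc with hr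
  set c := if v < r * (q + 1) then PySem.Int.floordiv v (q + 1)
           else r + PySem.Int.floordiv (v - r * (q + 1)) q with hcdef
  set bd : Int → Int := fun ci => (ci + 1) * q + min (ci + 1) r with hbd
  set bs := (PySem.List.pyRange 0 nc 1).map bd with hbs
  have hlen : bs.length = nc.toNat := by
    rw [hbs, List.length_map, PySem.List.length_pyRange_one]; omega
  have hget : ∀ (k : Nat) (hk : k < bs.length), bs[k] = bd (k : Int) := by
    intro k hk
    simp only [hbs, List.getElem_map]
    rw [PySem.List.getElem_pyRange_one]
    simp
  have hklt : c.toNat < bs.length := by rw [hlen]; omega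
  have hfind : (PySem.List.enumerate bs 0).find? (fun p => decide (v < p.2)) =
      some ((0 : Int) + c.toNat, bs[c.toNat]) := by
    apply pv_find_enumerate bs (fun b => decide (v < b)) 0 c.toNat hklt
    · rw [hget c.toNat hklt]
      rw [Int.toNat_of_nonneg hc0]
      simpa using hup
    · intro j hj
      rw [hget j (Nat.lt_trans hj hklt)]
      simp only [decide_eq_false_iff_not, not_lt]
      exact hprev j (by positivity) (by omega)
  rw [hfind]
  show d.insert v ((0 : Int) + c.toNat) = d.insert v c
  rw [Int.toNat_of_nonneg hc0, zero_add]

-- ===== VERDICT (by name: the statement is the Claim_ definition above) =====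
theorem get_values2labels_py_spec : Claim_equal_get_values2labels_py := by
  intro nc ls _ hpre
  obtain ⟨hle, hne, hpos⟩ := hpre
  unfold Spec_get_values2labels_py get_values2labels_py get_values2labels_py_alt
  rw [if_neg (by omega), if_neg (by omega)]
  simp only [PySem.Int.divmod?, if_neg hne]
  rcases hpos with hnc | hls
  · -- main case: 0 < nc ≤ ls
    have hq : ls.fdiv nc = PySem.Int.floordiv ls nc := rfl
    have hr : ls.fmod nc = PySem.Int.mod ls nc := rfl
    rw [hq, hr]
    rw [PySem.List.foldl_congr_mem _ _
      (fun (d : PySem.Dict Int Int) v =>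
        d.insert v (if v < PySem.Int.mod ls nc * (PySem.Int.floordiv ls nc + 1)
          then PySem.Int.floordiv v (PySem.Int.floordiv ls nc + 1)
          else PySem.Int.mod ls nc +
            PySem.Int.floordiv (v - PySem.Int.mod ls nc * (PySem.Int.floordiv ls nc + 1))
              (PySem.Int.floordiv ls nc))) _
      (fun d v hv => by
        have hv' := PySem.List.mem_pyRange_one.mp hv
        exact pv_step_eq nc ls hnc hle v hv'.1 hv'.2 d)]
    rw [PySem.Dict.items_foldl_insert_fresh _ (fun v => v) _ _
      (fun a _ => PySem.Dict.contains_empty a)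
      (by simpa using PySem.List.nodup_pyRange_one 0 ls)]
    simp
    rfl
  · -- degenerate case: nc < 0 and ls ≤ 0 — the value range is empty, both return []
    rw [PySem.List.pyRange_one_eq_nil hls]
    simp
    rfl
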